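-- pv_equiv track=rewrite | github.com/kellen-sun/Contests | CCC Senior/CCC Senior 2006/s5.py | unhash
-- ===== SOURCE A (Python) =====
-- def unhash(grid):
--     s="0b"
--     for i in grid:
--         for j in i:
--             if j==".": s+="0"
--             if j=="*": s+="1"
--     s=int(s, 2)
--     return s
-- ===== SOURCE B (Python) =====
-- def unhash(grid):
--     result = 0
--     for row in grid:
--         for j in row:
--             if j == ".":
--                 result = result * 2
--             elif j == "*":
--                 result = result * 2 + 1
--     return result
-- ===== Notes on version B (the rewrite author's own statement) =====
-- stated objective: simpler
-- what changed: B accumulates the integer directly with Horner-style arithmetic (result=2*result(+1) per cell) instead of building a '0b...' string and parsing it with int(s,2).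
import Mathlib
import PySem

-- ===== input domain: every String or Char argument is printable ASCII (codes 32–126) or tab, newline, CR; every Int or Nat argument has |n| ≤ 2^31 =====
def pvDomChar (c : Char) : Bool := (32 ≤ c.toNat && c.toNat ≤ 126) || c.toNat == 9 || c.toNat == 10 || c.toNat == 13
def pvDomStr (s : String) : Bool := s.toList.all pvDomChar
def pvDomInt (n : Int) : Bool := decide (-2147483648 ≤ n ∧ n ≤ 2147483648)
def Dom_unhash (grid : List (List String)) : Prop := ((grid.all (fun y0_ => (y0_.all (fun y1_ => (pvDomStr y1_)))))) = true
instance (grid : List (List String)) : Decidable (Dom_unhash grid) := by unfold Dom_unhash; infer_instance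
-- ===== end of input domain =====

-- B replaces A's binary-string construction + int(s,2) parse by direct Horner-style integer accumulation (simpler).


-- ===== PORT A =====
-- int(s,2) hand-ported: for s = "0b" ++ binary digits it folds the digits with acc*2 + digit,
-- exact whenever at least one digit is present (guaranteed by Pre_unhash); Python raises ValueError on "0b".
def unhash (grid : List (List String)) : Int :=
  let s := grid.foldl (fun s i => i.foldl (fun s j =>
      let s := if j = "." then s ++ "0" else s
      if j = "*" then s ++ "1" else s) s) "0b"
  (s.toList.drop 2).foldl (fun a c => 2 * a + (if c = '1' then 1 else 0)) 0

-- ===== PORT B =====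
def unhash_alt (grid : List (List String)) : Int :=
  grid.foldl (fun r row => row.foldl (fun r j =>
    if j = "." then 2 * r else if j = "*" then 2 * r + 1 else r) r) 0

-- ===== PRECONDITION & SPEC =====
-- Pre_ excludes exactly the grids with no "." or "*" cell: there A computes int("0b",2), which raises ValueError.
def Pre_unhash (grid : List (List String)) : Prop :=
  ∃ row ∈ grid, ∃ j ∈ row, j = "." ∨ j = "*"
instance (grid : List (List String)) : Decidable (Pre_unhash grid) := by unfold Pre_unhash; infer_instance
def pvWitness_unhash : List (List String) := [[".", "*"]]

def Spec_unhash (grid : List (List String)) (out : Int) : Prop := out = unhash_alt grid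
instance (grid : List (List String)) (out : Int) : Decidable (Spec_unhash grid out) := by unfold Spec_unhash; infer_instance

-- ===== CLAIM (what is proved, stated in full; the proofs are below) =====
def Claim_equal_unhash : Prop := ∀ (grid : List (List String)), Dom_unhash grid → Pre_unhash grid → Spec_unhash grid (unhash grid)

-- ===== LEMMAS AND PROOFS =====

-- the bit(s) a single cell contributes to A's string
def pvBit (j : String) : List Char := if j = "." then ['0'] else if j = "*" then ['1'] else []

-- Horner evaluation of a list of bit characters from accumulator r (A's parse loop)
def pvVal (r : Int) (bs : List Char) : Int :=
  bs.foldl (fun a c => 2 * a + (if c = '1' then 1 else 0)) r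

theorem pvVal_append (r : Int) (xs ys : List Char) :
    pvVal r (xs ++ ys) = pvVal (pvVal r xs) ys := by
  simp [pvVal, List.foldl_append]

theorem pvCellA (s : String) (j : String) :
    ((fun s j => let s := if j = "." then s ++ "0" else s
                 if j = "*" then s ++ "1" else s) s j).toList = s.toList ++ pvBit j := by
  by_cases h1 : j = "." <;> by_cases h2 : j = "*" <;> simp_all [pvBit]

theorem pvRowA (row : List String) (s : String) :
    (row.foldl (fun s j => let s := if j = "." then s ++ "0" else s
                           if j = "*" then s ++ "1" else s) s).toList
      = s.toList ++ row.flatMap pvBit := by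
  induction row generalizing s with
  | nil => simp
  | cons j rest ih => simp [List.foldl_cons, ih, pvCellA]

theorem pvGridA (grid : List (List String)) (s : String) :
    (grid.foldl (fun s i => i.foldl (fun s j => let s := if j = "." then s ++ "0" else s
                                                if j = "*" then s ++ "1" else s) s) s).toList
      = s.toList ++ grid.flatMap (fun row => row.flatMap pvBit) := by
  induction grid generalizing s with
  | nil => simp
  | cons row rest ih => simp [List.foldl_cons, ih, pvRowA]

theorem pvCellB (r : Int) (j : String) :
    (if j = "." then 2 * r else if j = "*" then 2 * r + 1 else r) = pvVal r (pvBit j) := by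
  by_cases h1 : j = "." <;> by_cases h2 : j = "*" <;> simp_all [pvBit, pvVal]

theorem pvRowB (row : List String) (r : Int) :
    row.foldl (fun r j => if j = "." then 2 * r else if j = "*" then 2 * r + 1 else r) r
      = pvVal r (row.flatMap pvBit) := by
  induction row generalizing r with
  | nil => simp [pvVal]
  | cons j rest ih =>
    simp only [List.foldl_cons, List.flatMap_cons]
    rw [ih, pvCellB, pvVal_append]

theorem pvGridB (grid : List (List String)) (r : Int) :
    grid.foldl (fun r row => row.foldl (fun r j =>
        if j = "." then 2 * r else if j = "*" then 2 * r + 1 else r) r) r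
      = pvVal r (grid.flatMap fun row => row.flatMap pvBit) := by
  induction grid generalizing r with
  | nil => simp [pvVal]
  | cons row rest ih =>
    simp only [List.foldl_cons, List.flatMap_cons]
    rw [ih, pvRowB, pvVal_append]

-- ===== VERDICT (by name: the statement is the Claim_ definition above) =====
theorem unhash_spec : Claim_equal_unhash := by
  intro grid _ _
  show unhash grid = unhash_alt grid
  rw [unhash, unhash_alt, pvGridB]
  have h := pvGridA grid "0b"
  simp only [h]
  rfl
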